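-- pv_equiv track=rewrite | github.com/DiegOliveros/Programacion-C1-Python | Código Clase/S5 22022 05 19/temp.py | desencriptar
-- ===== SOURCE A (Python) =====
-- def desencriptar(listacifrada, lista_a,cadena):
--     cadenasif=["","","",""]
--     for i in listacifrada:
--         if i == lista_a[0]:  #código secreto
--             cadenasif[0]=cadena[0]  #la representación guardada
--         if i == lista_a[1]:
--             cadenasif[1]=cadena[1]
--         if i == lista_a[2]:
--             cadenasif[2]=cadena[2]
--         if i == lista_a[3]:
--             cadenasif[3]=cadena[3]
--
--     return cadenasif
-- ===== SOURCE B (Python) =====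
-- def desencriptar(listacifrada, lista_a, cadena):
--     # Position-wise: for each of the four (code, representation) pairs, the slot is
--     # revealed exactly when its code occurs in listacifrada.
--     pares = list(zip(lista_a, cadena))[:4]
--     out = [rep if codigo in listacifrada else "" for codigo, rep in pares]
--     return out + [""] * (4 - len(out))
-- ===== Notes on version B (the rewrite author's own statement) =====
-- stated objective: idiomatic
-- what changed: B replaces A's element loop with hard-coded per-position if-chains by a position-wise comprehension over the first four zipped (code, representation) pairs, revealing each slot iff its code occurs in listacifrada.
import Mathlib
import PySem

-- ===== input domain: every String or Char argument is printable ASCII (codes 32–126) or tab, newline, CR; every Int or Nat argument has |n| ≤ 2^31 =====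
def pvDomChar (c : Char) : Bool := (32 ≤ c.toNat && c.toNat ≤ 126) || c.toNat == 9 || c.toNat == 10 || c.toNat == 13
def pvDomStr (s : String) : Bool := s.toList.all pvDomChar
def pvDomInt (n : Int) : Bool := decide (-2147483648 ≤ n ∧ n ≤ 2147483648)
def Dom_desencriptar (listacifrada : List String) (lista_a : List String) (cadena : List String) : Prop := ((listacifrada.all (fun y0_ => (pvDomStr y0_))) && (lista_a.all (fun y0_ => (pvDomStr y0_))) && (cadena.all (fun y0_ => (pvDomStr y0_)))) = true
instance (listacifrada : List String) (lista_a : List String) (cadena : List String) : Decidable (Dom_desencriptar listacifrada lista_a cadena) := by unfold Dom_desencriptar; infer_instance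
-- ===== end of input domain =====

-- B rewrites A's element loop as a position-wise comprehension over the zipped code/representation
-- pairs (idiomatic; not faster).

-- ===== PORT A =====
-- loop body of A's 'for i in listacifrada'; the pyGetD default "" is only reached on inputs
-- excluded by Pre_desencriptar (where Python raises IndexError), so the port is exact on Pre_.
def stepA (lista_a : List String) (cadena : List String) (s : List String) (i : String) : List String :=
  let s := if i == PySem.List.pyGetD lista_a 0 "" then s.set 0 (PySem.List.pyGetD cadena 0 "") else s
  let s := if i == PySem.List.pyGetD lista_a 1 "" then s.set 1 (PySem.List.pyGetD cadena 1 "") else s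
  let s := if i == PySem.List.pyGetD lista_a 2 "" then s.set 2 (PySem.List.pyGetD cadena 2 "") else s
  if i == PySem.List.pyGetD lista_a 3 "" then s.set 3 (PySem.List.pyGetD cadena 3 "") else s

def desencriptar (listacifrada : List String) (lista_a : List String) (cadena : List String) : List String :=
  listacifrada.foldl (stepA lista_a cadena) ["", "", "", ""]

-- ===== PORT B =====
def desencriptar_alt (listacifrada : List String) (lista_a : List String) (cadena : List String) : List String :=
  let pares := PySem.List.slice (lista_a.zip cadena) none (some 4)
  let out := pares.map (fun p => if listacifrada.contains p.1 then p.2 else "")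
  out ++ List.replicate (4 - out.length) ""

-- ===== PRECONDITION & SPEC =====
-- Pre_ is exactly the no-IndexError set of A: either the loop never runs, or lista_a has the four
-- codes and cadena reaches every position whose code actually occurs in listacifrada.
def Pre_desencriptar (listacifrada : List String) (lista_a : List String) (cadena : List String) : Prop :=
  listacifrada = [] ∨
    (4 ≤ lista_a.length ∧ ∀ j < 4, lista_a.getD j "" ∈ listacifrada → j < cadena.length)
instance (listacifrada : List String) (lista_a : List String) (cadena : List String) : Decidable (Pre_desencriptar listacifrada lista_a cadena) := by unfold Pre_desencriptar; infer_instance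
def pvWitness_desencriptar : List String × List String × List String :=
  (["a"], ["a", "b", "c", "d"], ["w", "x", "y", "z"])

def Spec_desencriptar (listacifrada : List String) (lista_a : List String) (cadena : List String) (out : List String) : Prop := out = desencriptar_alt listacifrada lista_a cadena
instance (listacifrada : List String) (lista_a : List String) (cadena : List String) (out : List String) : Decidable (Spec_desencriptar listacifrada lista_a cadena out) := by unfold Spec_desencriptar; infer_instance

-- ===== CLAIM (what is proved, stated in full; the proofs are below) =====
def Claim_equal_desencriptar : Prop := ∀ (listacifrada : List String) (lista_a : List String) (cadena : List String), Dom_desencriptar listacifrada lista_a cadena → Pre_desencriptar listacifrada lista_a cadena → Spec_desencriptar listacifrada lista_a cadena (desencriptar listacifrada lista_a cadena)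

-- ===== LEMMAS AND PROOFS =====
-- one slot across one loop step: "already set over L, else set now by i" = "set over i :: L"
theorem slot_step (a c s i : String) (L : List String) :
    (if a ∈ L then c else if i == a then c else s) = (if a = i ∨ a ∈ L then c else s) := by
  by_cases h1 : a ∈ L
  · simp [h1]
  · by_cases h2 : a = i
    · subst h2; simp [h1]
    · have h2' : ¬ i = a := fun h => h2 h.symm
      simp [h1, h2, h2']

-- xs[:4] as List.take
theorem slice_take4 {α : Type} (xs : List α) : PySem.List.slice xs none (some 4) = xs.take 4 := by
  rw [PySem.List.slice_to xs (by decide)]; rfl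

-- A's loop, characterised position-wise: each slot holds cadena's entry iff its code occurs in the list.
theorem foldA_char (lista_a cadena : List String) (L : List String) (s0 s1 s2 s3 : String) :
    L.foldl (stepA lista_a cadena) [s0, s1, s2, s3] =
      [if PySem.List.pyGetD lista_a 0 "" ∈ L then PySem.List.pyGetD cadena 0 "" else s0,
       if PySem.List.pyGetD lista_a 1 "" ∈ L then PySem.List.pyGetD cadena 1 "" else s1,
       if PySem.List.pyGetD lista_a 2 "" ∈ L then PySem.List.pyGetD cadena 2 "" else s2,
       if PySem.List.pyGetD lista_a 3 "" ∈ L then PySem.List.pyGetD cadena 3 "" else s3] := by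
  induction L generalizing s0 s1 s2 s3 with
  | nil => simp
  | cons i L ih =>
    rw [List.foldl_cons]
    have hstep : stepA lista_a cadena [s0, s1, s2, s3] i =
        [if i == PySem.List.pyGetD lista_a 0 "" then PySem.List.pyGetD cadena 0 "" else s0,
         if i == PySem.List.pyGetD lista_a 1 "" then PySem.List.pyGetD cadena 1 "" else s1,
         if i == PySem.List.pyGetD lista_a 2 "" then PySem.List.pyGetD cadena 2 "" else s2,
         if i == PySem.List.pyGetD lista_a 3 "" then PySem.List.pyGetD cadena 3 "" else s3] := by
      unfold stepA
      split_ifs <;> rfl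
    rw [hstep, ih]
    simp only [slot_step, List.mem_cons]

set_option maxHeartbeats 1600000 in
theorem desencriptar_spec' (listacifrada lista_a cadena : List String)
    (hpre : Pre_desencriptar listacifrada lista_a cadena) :
    desencriptar listacifrada lista_a cadena = desencriptar_alt listacifrada lista_a cadena := by
  unfold desencriptar desencriptar_alt
  rcases hpre with hnil | ⟨h4, hj⟩
  · subst hnil
    rcases lista_a.zip cadena with _ | ⟨p0, _ | ⟨p1, _ | ⟨p2, _ | ⟨p3, r⟩⟩⟩⟩ <;>
      simp [slice_take4]
  · rw [foldA_char]
    rcases lista_a with _ | ⟨a0, _ | ⟨a1, _ | ⟨a2, _ | ⟨a3, ar⟩⟩⟩⟩ <;> simp at h4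
    have h0 := hj 0 (by decide)
    have h1 := hj 1 (by decide)
    have h2 := hj 2 (by decide)
    have h3 := hj 3 (by decide)
    simp only [List.getD_cons_zero, List.getD_cons_succ] at h0 h1 h2 h3
    have ga1 : PySem.List.pyGetD (a0 :: a1 :: a2 :: a3 :: ar) 1 "" = a1 := by simp [pysem]
    have ga2 : PySem.List.pyGetD (a0 :: a1 :: a2 :: a3 :: ar) 2 "" = a2 := by simp [pysem]
    have ga3 : PySem.List.pyGetD (a0 :: a1 :: a2 :: a3 :: ar) 3 "" = a3 := by simp [pysem]
    rcases cadena with _ | ⟨c0, _ | ⟨c1, _ | ⟨c2, _ | ⟨c3, cr⟩⟩⟩⟩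
    · have m0 : a0 ∉ listacifrada := fun h => by simpa using h0 h
      have m1 : a1 ∉ listacifrada := fun h => by simpa using h1 h
      have m2 : a2 ∉ listacifrada := fun h => by simpa using h2 h
      have m3 : a3 ∉ listacifrada := fun h => by simpa using h3 h
      simp [slice_take4, ga1, ga2, ga3, m0, m1, m2, m3]
    · have m1 : a1 ∉ listacifrada := fun h => by simpa using h1 h
      have m2 : a2 ∉ listacifrada := fun h => by simpa using h2 h
      have m3 : a3 ∉ listacifrada := fun h => by simpa using h3 h
      simp [slice_take4, ga1, ga2, ga3, m1, m2, m3,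
        PySem.List.pyGetD_zero_cons, List.contains_eq_mem]
    · have m2 : a2 ∉ listacifrada := fun h => by simpa using h2 h
      have m3 : a3 ∉ listacifrada := fun h => by simpa using h3 h
      have gc1 : PySem.List.pyGetD [c0, c1] 1 "" = c1 := by simp [pysem]
      simp [slice_take4, ga1, ga2, ga3, gc1, m2, m3,
        PySem.List.pyGetD_zero_cons, List.contains_eq_mem]
    · have m3 : a3 ∉ listacifrada := fun h => by simpa using h3 h
      have gc1 : PySem.List.pyGetD [c0, c1, c2] 1 "" = c1 := by simp [pysem]
      have gc2 : PySem.List.pyGetD [c0, c1, c2] 2 "" = c2 := by simp [pysem]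
      simp [slice_take4, ga1, ga2, ga3, gc1, gc2, m3,
        PySem.List.pyGetD_zero_cons, List.contains_eq_mem]
    · have gc1 : PySem.List.pyGetD (c0 :: c1 :: c2 :: c3 :: cr) 1 "" = c1 := by simp [pysem]
      have gc2 : PySem.List.pyGetD (c0 :: c1 :: c2 :: c3 :: cr) 2 "" = c2 := by simp [pysem]
      have gc3 : PySem.List.pyGetD (c0 :: c1 :: c2 :: c3 :: cr) 3 "" = c3 := by simp [pysem]
      simp [slice_take4, ga1, ga2, ga3, gc1, gc2, gc3,
        PySem.List.pyGetD_zero_cons, List.contains_eq_mem]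

-- ===== VERDICT (by name: the statement is the Claim_ definition above) =====
theorem desencriptar_spec : Claim_equal_desencriptar := by
  intro l la ca _ hpre
  unfold Spec_desencriptar
  exact desencriptar_spec' l la ca hpre
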